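-- pv_equiv track=rewrite | github.com/grace-lovell/cs-325-bioinformatics | group_assignment_1a.py | ValidateCSeqs
-- ===== SOURCE A (Python) =====
-- def ValidateCSeqs(starts, ends):
--     validPromoters = []
--     for s in starts:
--         for e in ends:
--             spacer = e - (s + 6)
--             if 16 <= spacer <= 19:
--                 validPromoters.append((s, e))
--     return validPromoters
-- ===== SOURCE B (Python) =====
-- def ValidateCSeqs(starts, ends):
--     # Bucket the ends by value once; for each start, look up the four
--     # admissible end values (s+22..s+25) and restore the original end order.
--     buckets = {}
--     for i, e in enumerate(ends):
--         buckets.setdefault(e, []).append((i, e))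
--     out = []
--     for s in starts:
--         matches = []
--         for v in (s + 22, s + 23, s + 24, s + 25):
--             matches.extend(buckets.get(v, []))
--         matches.sort(key=lambda p: p[0])
--         for i, e in matches:
--             out.append((s, e))
--     return out
-- ===== Notes on version B (the rewrite author's own statement) =====
-- stated objective: faster
-- what changed: Replaces the nested scan over all (start,end) pairs by a one-pass dict index of ends by value; each start looks up only its four admissible end values s+22..s+25 and a sort on the (tiny) match list restores the original end order.
import Mathlib
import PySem

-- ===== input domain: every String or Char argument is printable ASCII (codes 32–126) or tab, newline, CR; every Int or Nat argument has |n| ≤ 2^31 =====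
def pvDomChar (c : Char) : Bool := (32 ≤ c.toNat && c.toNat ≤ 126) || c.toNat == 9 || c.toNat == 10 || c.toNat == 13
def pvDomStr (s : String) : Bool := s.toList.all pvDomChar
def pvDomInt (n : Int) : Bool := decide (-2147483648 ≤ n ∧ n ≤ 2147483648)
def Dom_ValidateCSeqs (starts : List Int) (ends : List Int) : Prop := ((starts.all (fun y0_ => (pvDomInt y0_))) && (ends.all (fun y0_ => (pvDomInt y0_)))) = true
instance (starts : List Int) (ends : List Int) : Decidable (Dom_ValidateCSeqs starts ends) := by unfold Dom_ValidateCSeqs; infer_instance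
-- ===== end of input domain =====

-- B replaces A's nested scan over all (start,end) pairs by a dict index of ends by
-- value (four lookups per start + a small sort restoring end order): measurably faster.


-- ===== PORT A =====
def ValidateCSeqs (starts : List Int) (ends : List Int) : List (Int × Int) :=
  starts.foldl (fun validPromoters s =>
    ends.foldl (fun validPromoters e =>
      let spacer := e - (s + 6)
      if 16 ≤ spacer ∧ spacer ≤ 19 then validPromoters ++ [(s, e)] else validPromoters)
      validPromoters) []

-- ===== PORT B =====
def ValidateCSeqs_alt (starts : List Int) (ends : List Int) : List (Int × Int) :=
  let buckets : PySem.Dict Int (List (Int × Int)) :=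
    (PySem.List.enumerate ends).foldl
      (fun d p => d.modify p.2 [] (fun l => l ++ [p])) PySem.Dict.empty
  starts.foldl (fun out s =>
    let ms :=
      [s + 22, s + 23, s + 24, s + 25].foldl (fun m v => m ++ buckets.getD v []) []
    let ms := PySem.List.sorted ms (fun p => p.1) false
    ms.foldl (fun out p => out ++ [(s, p.2)]) out) []

-- ===== PRECONDITION & SPEC =====
def Spec_ValidateCSeqs (starts : List Int) (ends : List Int) (out : List (Int × Int)) : Prop := out = ValidateCSeqs_alt starts ends
instance (starts : List Int) (ends : List Int) (out : List (Int × Int)) : Decidable (Spec_ValidateCSeqs starts ends out) := by unfold Spec_ValidateCSeqs; infer_instance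

-- ===== CLAIM (what is proved, stated in full; the proofs are below) =====
def Claim_equal_ValidateCSeqs : Prop := ∀ (starts : List Int) (ends : List Int), Dom_ValidateCSeqs starts ends → Spec_ValidateCSeqs starts ends (ValidateCSeqs starts ends)

-- ===== LEMMAS AND PROOFS =====

-- the bucket fold: looking up v yields exactly the enumerated pairs whose value is v
theorem bucket_getD (l : List (Int × Int)) (d : PySem.Dict Int (List (Int × Int))) (v : Int) :
    ((l.foldl (fun d p => d.modify p.2 [] (fun t => t ++ [p])) d).getD v []) =
      d.getD v [] ++ l.filter (fun p => p.2 == v) := by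
  induction l generalizing d with
  | nil => simp
  | cons x xs ih =>
    simp only [List.foldl_cons, List.filter_cons, ih]
    by_cases h : x.2 = v
    · subst h
      simp [PySem.Dict.getD_modify_self]
    · rw [PySem.Dict.getD_modify_of_ne]
      · simp [h]
      · exact fun hvv => h hvv.symm
  
-- disjoint predicates: concatenated filters permute to the filter of the disjunction
theorem perm_filter_or {α : Type} (p q : α → Bool) (h : ∀ x, p x = true → q x = false)
    (l : List α) : (l.filter p ++ l.filter q).Perm (l.filter (fun x => p x || q x)) := by
  induction l with
  | nil => simp
  | cons x xs ih =>
    by_cases hp : p x = true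
    · have hq := h x hp
      simp only [List.filter_cons, hp, hq, Bool.true_or, if_true, Bool.false_eq_true, if_false,
        List.cons_append]
      exact ih.cons x
    · by_cases hq : q x = true
      · simp only [List.filter_cons, hp, hq, Bool.false_or, if_true, Bool.false_eq_true, if_false]
        exact (List.perm_middle).trans (List.Perm.cons _ ih)
      · simp [hp, hq, ih]

-- the filtered enumeration, projected to values
theorem filter_enumerate_map (pr : Int → Bool) (s : Int) (xs : List Int) : ∀ (s0 : Int),
    (((PySem.List.enumerate xs s0).filter (fun p => pr p.2)).map (fun p => (s, p.2))) =
      (xs.filter pr).map (fun e => (s, e)) := by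
  induction xs with
  | nil => intro _; simp [PySem.List.enumerate_nil]
  | cons x t ih =>
    intro s0
    simp only [PySem.List.enumerate_cons, List.filter_cons]
    by_cases h : pr x = true
    · simp [h, ih]
    · simp [h, ih]

-- per-start: B's sorted bucket lookups are exactly the enumerated ends in the window
theorem ms_eq (ends : List Int) (s : Int) :
    PySem.List.sorted
      ([s + 22, s + 23, s + 24, s + 25].foldl
        (fun m v =>
          m ++ ((PySem.List.enumerate ends).foldl
            (fun d p => d.modify p.2 [] (fun t => t ++ [p])) PySem.Dict.empty).getD v [])
        [])
      (fun p => p.1) false =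
    (PySem.List.enumerate ends).filter
      (fun p => decide (s + 22 ≤ p.2) && decide (p.2 ≤ s + 25)) := by
  have hb : ∀ v, ((PySem.List.enumerate ends).foldl
      (fun d p => d.modify p.2 [] (fun t => t ++ [p])) PySem.Dict.empty).getD v [] =
      (PySem.List.enumerate ends).filter (fun p => p.2 == v) := by
    intro v
    rw [bucket_getD]
    simp
  apply PySem.List.sorted_eq_of_perm_of_pairwise_lt
  · -- permutation
    simp only [List.foldl_cons, List.foldl_nil, List.nil_append, hb]
    set L := PySem.List.enumerate ends 0 with hL
    have h1 := perm_filter_or (fun p : Int × Int => p.2 == s + 22) (fun p => p.2 == s + 23)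
      (by intro x hx; simp only [beq_iff_eq] at hx; simp only [beq_eq_false_iff_ne]; omega) L
    have h2 := perm_filter_or (fun p : Int × Int => (p.2 == s + 22 || p.2 == s + 23))
      (fun p => p.2 == s + 24) (by intro x hx; simp only [Bool.or_eq_true, beq_iff_eq] at hx; simp only [beq_eq_false_iff_ne]; omega) L
    have h3 := perm_filter_or
      (fun p : Int × Int => (p.2 == s + 22 || p.2 == s + 23 || p.2 == s + 24))
      (fun p => p.2 == s + 25) (by intro x hx; simp only [Bool.or_eq_true, beq_iff_eq] at hx; simp only [beq_eq_false_iff_ne]; omega) L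
    have e1 : ((L.filter (fun p : Int × Int => p.2 == s + 22) ++ L.filter (fun p => p.2 == s + 23)
        ++ L.filter (fun p => p.2 == s + 24) ++ L.filter (fun p => p.2 == s + 25))).Perm
        (L.filter (fun p => p.2 == s + 22 || p.2 == s + 23 || p.2 == s + 24 || p.2 == s + 25)) :=
      ((h1.append_right _).append_right _).trans ((h2.append_right _).trans h3)
    have e2 : L.filter (fun p : Int × Int => p.2 == s + 22 || p.2 == s + 23 || p.2 == s + 24 || p.2 == s + 25)
        = L.filter (fun p => decide (s + 22 ≤ p.2) && decide (p.2 ≤ s + 25)) := by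
      apply List.filter_congr
      intro x _
      rw [Bool.eq_iff_iff]
      simp only [Bool.or_eq_true, beq_iff_eq, Bool.and_eq_true, decide_eq_true_eq]
      omega
    rw [e2] at e1
    exact e1.symm
  · -- the filtered enumeration has strictly increasing indices
    exact List.Pairwise.sublist List.filter_sublist (PySem.List.pairwise_lt_enumerate ends 0)

-- ===== VERDICT (by name: the statement is the Claim_ definition above) =====
theorem ValidateCSeqs_spec : Claim_equal_ValidateCSeqs := by
  intro starts ends _
  unfold Spec_ValidateCSeqs ValidateCSeqs ValidateCSeqs_alt
  simp only []
  apply PySem.List.foldl_congr_mem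
  intro acc s _
  rw [ms_eq ends s]
  rw [PySem.List.foldl_append_ite (p := fun e => 16 ≤ e - (s + 6) ∧ e - (s + 6) ≤ 19)
    (f := fun e => (s, e))]
  rw [PySem.List.foldl_append_singleton_eq_map]
  rw [filter_enumerate_map (fun e => decide (s + 22 ≤ e) && decide (e ≤ s + 25)) s ends 0]
  congr 2
  apply List.filter_congr
  intro x _
  rw [Bool.eq_iff_iff]
  simp only [Bool.and_eq_true, decide_eq_true_eq]
  omega
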